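-- pv_equiv track=rewrite | github.com/5herlocked/underwatervlc | receiver_basic.py | pretty_bits
-- ===== SOURCE A (Python) =====
-- def pretty_bits(bits):
--     prettified_bits = ""
--
--     i = 0
--     internal_counter = 0
--     while i < len(bits):
--         prettified_bits += bits[i]
--         i += 1
--         internal_counter += 1
--         if internal_counter == 8:
--             prettified_bits += " "
--         if internal_counter == 16:
--             prettified_bits += "\n"
--             internal_counter = 0
--
--     return prettified_bits
-- ===== SOURCE B (Python) =====
-- def pretty_bits(bits):
--     chunks = [bits[k:k + 8] for k in range(0, len(bits), 8)]
--     parts = []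
--     for j, chunk in enumerate(chunks):
--         if len(chunk) == 8:
--             parts.append(chunk + (" " if j % 2 == 0 else "\n"))
--         else:
--             parts.append(chunk)
--     return "".join(parts)
-- ===== Notes on version B (the rewrite author's own statement) =====
-- stated objective: faster
-- what changed: B slices the string into 8-character chunks joined once with a parity-keyed separator (space for even chunk index, newline for odd, bare final partial chunk), replacing A's char-by-char while loop with a mod-16 counter and quadratic string concatenation.
import Mathlib
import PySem

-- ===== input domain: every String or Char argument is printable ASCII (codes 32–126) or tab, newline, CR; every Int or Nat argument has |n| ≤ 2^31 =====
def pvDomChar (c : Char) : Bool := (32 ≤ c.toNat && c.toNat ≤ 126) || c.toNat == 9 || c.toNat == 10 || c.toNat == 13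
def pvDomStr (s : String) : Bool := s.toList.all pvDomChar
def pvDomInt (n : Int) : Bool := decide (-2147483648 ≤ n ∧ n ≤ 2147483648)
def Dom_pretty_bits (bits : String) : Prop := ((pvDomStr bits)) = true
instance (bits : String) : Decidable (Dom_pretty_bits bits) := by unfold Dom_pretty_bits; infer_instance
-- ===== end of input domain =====

-- B replaces A's char-by-char loop with mod-16 counter by slicing into 8-char chunks
-- with a parity-keyed separator (objective: simpler).

-- ===== PORT A =====
-- A's while loop: one char per step, counter incremented, space at 8, newline+reset at 16.
def prettyA : List Char → Nat → List Char
  | [], _ => []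
  | c :: rest, cnt =>
    let cnt1 := cnt + 1
    let sep := (if cnt1 = 8 then [' '] else []) ++ (if cnt1 = 16 then ['\n'] else [])
    c :: (sep ++ prettyA rest (if cnt1 = 16 then 0 else cnt1))

def pretty_bits (bits : String) : String := String.ofList (prettyA bits.toList 0)

-- ===== PORT B =====
-- B's chunking loop: take 8 chars at a time; full chunk gets ' ' (even chunk index) or '\n' (odd); a short final chunk is bare.
def prettyB (l : List Char) (j : Nat) : List (List Char) :=
  if l = [] then []
  else
    let chunk := l.take 8
    if chunk.length = 8 then
      (chunk ++ [if j % 2 = 0 then ' ' else '\n']) :: prettyB (l.drop 8) (j + 1)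
    else
      [chunk]
termination_by l.length
decreasing_by cases l with
  | nil => simp_all
  | cons a t => simp [List.length_drop]

def pretty_bits_alt (bits : String) : String := String.ofList (prettyB bits.toList 0).flatten

-- ===== PRECONDITION & SPEC =====
def Spec_pretty_bits (bits : String) (out : String) : Prop := out = pretty_bits_alt bits
instance (bits : String) (out : String) : Decidable (Spec_pretty_bits bits out) := by unfold Spec_pretty_bits; infer_instance

-- ===== CLAIM (what is proved, stated in full; the proofs are below) =====
def Claim_equal_pretty_bits : Prop := ∀ (bits : String), Dom_pretty_bits bits → Spec_pretty_bits bits (pretty_bits bits)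

-- ===== LEMMAS AND PROOFS =====

theorem prettyB_big (a b c d e f g hc : Char) (rest : List Char) (j : Nat) :
    prettyB (a::b::c::d::e::f::g::hc::rest) j =
      ([a,b,c,d,e,f,g,hc] ++ [if j % 2 = 0 then ' ' else '\n']) :: prettyB rest (j + 1) := by
  rw [prettyB.eq_def]
  simp

theorem prettyAB (n : Nat) : ∀ (l : List Char), l.length ≤ n → ∀ (j : Nat),
    prettyA l (if j % 2 = 0 then 0 else 8) = (prettyB l j).flatten := by
  induction n with
  | zero =>
    intro l h j
    have : l = [] := by cases l <;> simp_all
    subst this; simp [prettyA, prettyB]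
  | succ n ih =>
    intro l h j
    match l with
    | [] => simp [prettyA, prettyB]
    | [a] => by_cases hj : j % 2 = 0 <;> simp [prettyA, prettyB, hj]
    | [a,b] => by_cases hj : j % 2 = 0 <;> simp [prettyA, prettyB, hj]
    | [a,b,c] => by_cases hj : j % 2 = 0 <;> simp [prettyA, prettyB, hj]
    | [a,b,c,d] => by_cases hj : j % 2 = 0 <;> simp [prettyA, prettyB, hj]
    | [a,b,c,d,e] => by_cases hj : j % 2 = 0 <;> simp [prettyA, prettyB, hj]
    | [a,b,c,d,e,f] => by_cases hj : j % 2 = 0 <;> simp [prettyA, prettyB, hj]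
    | [a,b,c,d,e,f,g] => by_cases hj : j % 2 = 0 <;> simp [prettyA, prettyB, hj]
    | a::b::c::d::e::f::g::hc::rest =>
      have hr : rest.length ≤ n := by simp only [List.length_cons] at h; omega
      rw [prettyB_big]
      by_cases hj : j % 2 = 0
      · have hj1 : ¬ (j + 1) % 2 = 0 := by omega
        have := ih rest hr (j + 1)
        rw [if_neg hj1] at this
        simp [prettyA, hj, this]
      · have hj1 : (j + 1) % 2 = 0 := by omega
        have := ih rest hr (j + 1)
        rw [if_pos hj1] at this
        simp [prettyA, hj, this]

-- ===== VERDICT (by name: the statement is the Claim_ definition above) =====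
theorem pretty_bits_spec : Claim_equal_pretty_bits := by
  intro bits _
  unfold Spec_pretty_bits pretty_bits pretty_bits_alt
  have := prettyAB bits.toList.length bits.toList le_rfl 0
  simp at this
  rw [this]
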